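-- pv_equiv track=rewrite | github.com/Ditta1337/AdventOfCode2023 | 04/b.py | find_matching
-- ===== SOURCE A (Python) =====
-- def bin_search(my, winning_num): # O(log(n))
--     low = 0
--     high = len(my) - 1
--     while low <= high:
--         mid = (low + high) // 2
--         if my[mid] == winning_num:
--             return True
--         elif my[mid] > winning_num:
--             high = mid - 1
--         else:
--             low = mid + 1
--     return False
--
-- def find_matching(winning, my):
--     found_matches = 0
--     winning.sort()
--     my.sort()
--     for winning_num in winning:
--         if bin_search(my, winning_num):
--             found_matches += 1
--
--     return found_matches
-- ===== SOURCE B (Python) =====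
-- def find_matching(winning, my):
--     winning.sort()
--     my.sort()
--     my_set = set(my)
--     return sum(1 for w in winning if w in my_set)
-- ===== Notes on version B (the rewrite author's own statement) =====
-- stated objective: faster
-- what changed: Replaces the hand-written per-element binary search over the sorted list with a hash set built once and an O(1) membership test (both in-place sorts kept for side-effect parity); the bin_search helper disappears.
import Mathlib
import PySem

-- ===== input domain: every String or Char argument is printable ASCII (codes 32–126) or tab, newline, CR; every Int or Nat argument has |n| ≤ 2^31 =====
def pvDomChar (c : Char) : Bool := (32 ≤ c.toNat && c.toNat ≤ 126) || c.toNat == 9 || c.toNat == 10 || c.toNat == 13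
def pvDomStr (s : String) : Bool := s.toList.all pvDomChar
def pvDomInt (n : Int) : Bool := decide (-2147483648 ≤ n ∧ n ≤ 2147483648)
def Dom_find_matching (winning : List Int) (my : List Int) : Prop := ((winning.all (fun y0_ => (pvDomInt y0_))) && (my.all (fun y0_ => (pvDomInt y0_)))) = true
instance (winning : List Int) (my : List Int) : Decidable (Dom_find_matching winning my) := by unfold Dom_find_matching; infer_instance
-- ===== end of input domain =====

-- B replaces A's hand-written binary search with a set built once; both sorts are kept,
-- so the in-place mutation of both arguments (sorting) is preserved; equivalence is about the return value.

-- ===== PORT A =====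
-- while-loop of bin_search as fuel recursion; the fuel my.length + 1 strictly exceeds the
-- interval size high - low + 1, which shrinks every iteration, so the fuel never runs out.
def binSearchGo (my : List Int) (winning_num : Int) (low high : Int) : Nat → Bool
  | 0 => false
  | fuel + 1 =>
    if low ≤ high then
      let mid := PySem.Int.floordiv (low + high) 2
      match PySem.List.pyGet? my mid with
      | none => false   -- unreachable here: 0 ≤ low ≤ mid ≤ high < len, so Python never raises
      | some v =>
        if v = winning_num then true
        else if v > winning_num then binSearchGo my winning_num low (mid - 1) fuel
        else binSearchGo my winning_num (mid + 1) high fuel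
    else false

def bin_search (my : List Int) (winning_num : Int) : Bool :=
  binSearchGo my winning_num 0 ((my.length : Int) - 1) (my.length + 1)

def find_matching (winning : List Int) (my : List Int) : Int :=
  let ws := PySem.List.sorted winning (fun x => x) false
  let ms := PySem.List.sorted my (fun x => x) false
  ws.foldl (fun acc w => if bin_search ms w then acc + 1 else acc) 0

-- ===== PORT B =====
def find_matching_alt (winning : List Int) (my : List Int) : Int :=
  let ws := PySem.List.sorted winning (fun x => x) false
  let ms := PySem.List.sorted my (fun x => x) false
  let mySet : PySem.Set Int := PySem.Set.ofList ms
  ws.foldl (fun acc w => if PySem.Set.contains mySet w then acc + 1 else acc) 0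

-- ===== PRECONDITION & SPEC =====
def Spec_find_matching (winning : List Int) (my : List Int) (out : Int) : Prop := out = find_matching_alt winning my
instance (winning : List Int) (my : List Int) (out : Int) : Decidable (Spec_find_matching winning my out) := by unfold Spec_find_matching; infer_instance

-- ===== CLAIM (what is proved, stated in full; the proofs are below) =====
def Claim_equal_find_matching : Prop := ∀ (winning : List Int) (my : List Int), Dom_find_matching winning my → Spec_find_matching winning my (find_matching winning my)

-- ===== LEMMAS AND PROOFS =====

-- Binary search on a sorted list finds w iff w occurs at some index of [low, high].
lemma binSearchGo_correct (ms : List Int) (w : Int) (hs : ms.Pairwise (· ≤ ·)) :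
    ∀ (fuel : Nat) (low high : Int), 0 ≤ low → high < (ms.length : Int) →
      (high - low + 1).toNat < fuel →
      (binSearchGo ms w low high fuel = true ↔
        ∃ i : Nat, low ≤ (i : Int) ∧ (i : Int) ≤ high ∧ ms[i]? = some w) := by
  intro fuel
  induction fuel with
  | zero => intro low high _ _ hf; omega
  | succ fuel ih =>
    intro low high hlow hhigh hf
    by_cases hle : low ≤ high
    · have hmid := PySem.Int.floordiv_two_mid_bounds hle
      set mid := PySem.Int.floordiv (low + high) 2 with hmiddef
      have h0m : 0 ≤ mid := le_trans hlow hmid.1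
      have hml : mid < (ms.length : Int) := lt_of_le_of_lt hmid.2 hhigh
      have hget : PySem.List.pyGet? ms mid = some ms[mid.toNat] :=
        PySem.List.pyGet?_eq_some_getElem ms h0m hml
      have hsorted : ∀ (p q : Nat) (hp : p < ms.length) (hq : q < ms.length),
          p ≤ q → ms[p] ≤ ms[q] := by
        intro p q hp hq hpq
        rcases Nat.lt_or_ge p q with h | h
        · exact (List.pairwise_iff_getElem.mp hs) p q hp hq h
        · have : p = q := by omega
          subst this; exact le_refl _
      simp only [binSearchGo, if_pos hle, ← hmiddef, hget]
      by_cases heq : ms[mid.toNat] = w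
      · simp only [if_pos heq]
        constructor
        · intro _
          exact ⟨mid.toNat, by omega, by omega, by
            rw [List.getElem?_eq_getElem (by omega)]; exact congrArg some heq⟩
        · intro _; trivial
      · simp only [if_neg heq]
        by_cases hgt : ms[mid.toNat] > w
        · simp only [if_pos hgt]
          rw [ih low (mid - 1) hlow (by omega) (by omega)]
          constructor
          · rintro ⟨i, h1, h2, h3⟩; exact ⟨i, h1, by omega, h3⟩
          · rintro ⟨i, h1, h2, h3⟩
            refine ⟨i, h1, ?_, h3⟩
            -- i cannot be ≥ mid: then ms[i] ≥ ms[mid] > w but ms[i] = w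
            by_contra hcon
            have hi : mid.toNat ≤ i := by omega
            have hiL : i < ms.length := by omega
            have : ms[mid.toNat] ≤ ms[i] := hsorted _ _ (by omega) hiL hi
            have : ms[i] = w := by
              rw [List.getElem?_eq_getElem hiL] at h3
              exact Option.some.inj h3
            omega
        · simp only [if_neg hgt]
          have hlt : ms[mid.toNat] < w := by omega
          rw [ih (mid + 1) high (by omega) hhigh (by omega)]
          constructor
          · rintro ⟨i, h1, h2, h3⟩; exact ⟨i, by omega, h2, h3⟩
          · rintro ⟨i, h1, h2, h3⟩
            refine ⟨i, ?_, h2, h3⟩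
            by_contra hcon
            have hi : i ≤ mid.toNat := by omega
            have hiL : i < ms.length := by omega
            have : ms[i] ≤ ms[mid.toNat] := hsorted _ _ hiL (by omega) hi
            have : ms[i] = w := by
              rw [List.getElem?_eq_getElem hiL] at h3
              exact Option.some.inj h3
            omega
    · simp only [binSearchGo, if_neg hle]
      constructor
      · intro h; exact absurd h (by simp)
      · rintro ⟨i, h1, h2, _⟩; omega

lemma bin_search_mem (ms : List Int) (w : Int) (hs : ms.Pairwise (· ≤ ·)) :
    bin_search ms w = true ↔ w ∈ ms := by
  unfold bin_search
  rw [binSearchGo_correct ms w hs (ms.length + 1) 0 ((ms.length : Int) - 1)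
      (by omega) (by omega) (by omega)]
  constructor
  · rintro ⟨i, _, _, h3⟩
    exact List.mem_of_getElem? h3
  · intro hmem
    obtain ⟨i, hi, hgi⟩ := List.getElem_of_mem hmem
    exact ⟨i, by omega, by omega, by rw [List.getElem?_eq_getElem hi, hgi]⟩

-- ===== VERDICT (by name: the statement is the Claim_ definition above) =====
theorem find_matching_spec : Claim_equal_find_matching := by
  intro winning my _
  unfold Spec_find_matching find_matching find_matching_alt
  simp only []
  set ws := PySem.List.sorted winning (fun x => x) false
  set ms := PySem.List.sorted my (fun x => x) false with hmsdef
  have hsorted : ms.Pairwise (· ≤ ·) := by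
    have := PySem.List.sorted_pairwise my (fun x => x)
    simpa using this
  rw [PySem.List.foldl_if_add_one, PySem.List.foldl_if_add_one]
  congr 1
  norm_cast
  apply List.countP_congr
  intro w _
  rw [bin_search_mem ms w hsorted]
  simp [PySem.Set.mem_ofList]
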